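-- pv_equiv track=rewrite | github.com/semphorin/Piggify | piglatin.py | checkConsonants
-- ===== SOURCE A (Python) =====
-- def checkConsonants(inputword):
--     """Check starting consonants up to three, return int."""
--     cc = 0
--     vowels = ['a', 'e', 'i', 'o', 'u', 'y']
--     for letter in inputword:
--         if letter not in vowels:
--             cc += 1
--         elif letter == vowels[5] and cc == 0:
--             cc = 1
--             break
--         else:
--             break
--
--     return cc
-- ===== SOURCE B (Python) =====
-- import re
--
-- def checkConsonants(inputword):
--     """Check starting consonants up to three, return int."""
--     if inputword and inputword[0] == 'y':
--         return 1
--     return len(re.match(r'[^aeiouy]*', inputword).group())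
-- ===== Notes on version B (the rewrite author's own statement) =====
-- stated objective: idiomatic
-- what changed: Replaced the incremental break-loop counter with a leading-'y' guard plus a single regex match of the consonant prefix [^aeiouy]*.
import Mathlib
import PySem

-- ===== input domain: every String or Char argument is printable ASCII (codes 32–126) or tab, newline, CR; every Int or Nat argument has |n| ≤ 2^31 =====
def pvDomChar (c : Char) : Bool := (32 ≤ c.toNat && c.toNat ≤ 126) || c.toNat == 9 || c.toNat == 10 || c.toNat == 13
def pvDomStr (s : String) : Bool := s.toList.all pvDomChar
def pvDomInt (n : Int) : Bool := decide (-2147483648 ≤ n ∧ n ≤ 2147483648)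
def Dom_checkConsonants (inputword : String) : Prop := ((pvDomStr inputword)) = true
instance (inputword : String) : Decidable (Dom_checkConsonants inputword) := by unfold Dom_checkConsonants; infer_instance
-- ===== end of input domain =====

-- B replaces A's incremental break-loop with a leading-'y' guard plus a single
-- match of the consonant prefix [^aeiouy]* (idiomatic; same cost).

-- ===== PORT A =====
-- the for-loop with break, as structural recursion over the characters with accumulator cc
def checkConsonantsLoop (letters : List Char) (cc : Int) : Int :=
  match letters with
  | [] => cc
  | letter :: rest =>
    if ¬ (letter ∈ ['a', 'e', 'i', 'o', 'u', 'y']) then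
      checkConsonantsLoop rest (cc + 1)
    else if letter = 'y' ∧ cc = 0 then
      1  -- cc = 1; break
    else
      cc -- break

def checkConsonants (inputword : String) : Int :=
  checkConsonantsLoop inputword.toList 0

-- ===== PORT B =====
-- re.match(r'[^aeiouy]*', s).group() is the maximal prefix of chars outside "aeiouy";
-- ported as takeWhile on the character list (exact for this pattern).
def checkConsonants_alt (inputword : String) : Int :=
  if inputword.toList.head? = some 'y' then 1
  else (inputword.toList.takeWhile (fun c => ¬ (c ∈ ['a', 'e', 'i', 'o', 'u', 'y']))).length

-- ===== PRECONDITION & SPEC =====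
def Spec_checkConsonants (inputword : String) (out : Int) : Prop := out = checkConsonants_alt inputword
instance (inputword : String) (out : Int) : Decidable (Spec_checkConsonants inputword out) := by unfold Spec_checkConsonants; infer_instance

-- ===== CLAIM (what is proved, stated in full; the proofs are below) =====
def Claim_equal_checkConsonants : Prop := ∀ (inputword : String), Dom_checkConsonants inputword → Spec_checkConsonants inputword (checkConsonants inputword)

-- ===== LEMMAS AND PROOFS =====

-- once cc ≠ 0 the 'y' branch can no longer fire, so the loop just adds the consonant-prefix length
theorem checkConsonantsLoop_ne_zero (l : List Char) (cc : Int) (h : 0 < cc) :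
    checkConsonantsLoop l cc = cc + (l.takeWhile (fun c => ¬ (c ∈ ['a', 'e', 'i', 'o', 'u', 'y']))).length := by
  induction l generalizing cc with
  | nil => simp [checkConsonantsLoop]
  | cons c rest ih =>
    by_cases hc : c ∈ ['a', 'e', 'i', 'o', 'u', 'y']
    · simp [checkConsonantsLoop, hc, List.takeWhile]
      intro _ h0
      omega
    · rw [checkConsonantsLoop, if_pos (by simpa using hc), ih _ (by omega)]
      simp [List.takeWhile, hc]
      omega

theorem checkConsonantsLoop_zero (l : List Char) :
    checkConsonantsLoop l 0 =
      if l.head? = some 'y' then 1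
      else (l.takeWhile (fun c => ¬ (c ∈ ['a', 'e', 'i', 'o', 'u', 'y']))).length := by
  cases l with
  | nil => simp [checkConsonantsLoop]
  | cons c rest =>
    by_cases hy : c = 'y'
    · subst hy; simp [checkConsonantsLoop]
    · by_cases hc : c ∈ ['a', 'e', 'i', 'o', 'u', 'y']
      · simp [checkConsonantsLoop, hc, hy, List.takeWhile]
      · rw [checkConsonantsLoop, if_pos (by simpa using hc),
          checkConsonantsLoop_ne_zero _ _ (by omega)]
        simp [List.takeWhile, hc, hy]
        omega

-- ===== VERDICT (by name: the statement is the Claim_ definition above) =====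
theorem checkConsonants_spec : Claim_equal_checkConsonants := by
  intro s _
  unfold Spec_checkConsonants checkConsonants checkConsonants_alt
  rw [checkConsonantsLoop_zero]
  split <;> simp
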